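-- pv_equiv track=rewrite | github.com/Luka0917/GOA-homeworks | group 34/level 188/classwork/classwork.py | trouble
-- ===== SOURCE A (Python) =====
-- def trouble(x, t):
--     i = 0
--     while i < len(x) - 1:
--         if x[i] + x[i + 1] == t:
--             x.pop(i + 1)
--         else:
--             i += 1
--     return x
-- ===== SOURCE B (Python) =====
-- def trouble(x, t):
--     # Single pass: an element is dropped exactly when it sums with the last KEPT element to t.
--     # (A mutates x in place; B only computes the return value.)
--     out = []
--     for v in x:
--         if out and out[-1] + v == t:
--             continue
--         out.append(v)
--     return out
-- ===== Notes on version B (the rewrite author's own statement) =====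
-- stated objective: faster
-- what changed: Replaced the quadratic in-place while/pop loop with a single forward pass that appends each element unless it sums with the last kept element to t.
import Mathlib
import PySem

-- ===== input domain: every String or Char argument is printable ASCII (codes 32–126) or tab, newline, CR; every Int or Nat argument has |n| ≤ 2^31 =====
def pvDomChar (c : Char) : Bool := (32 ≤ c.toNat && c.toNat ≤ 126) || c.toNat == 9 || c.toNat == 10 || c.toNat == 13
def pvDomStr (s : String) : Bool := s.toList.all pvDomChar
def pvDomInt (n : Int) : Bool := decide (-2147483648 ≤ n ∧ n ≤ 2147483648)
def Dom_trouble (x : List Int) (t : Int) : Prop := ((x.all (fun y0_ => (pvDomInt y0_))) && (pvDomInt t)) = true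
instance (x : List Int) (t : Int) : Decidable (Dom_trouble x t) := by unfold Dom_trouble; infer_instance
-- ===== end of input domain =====

-- B is a single O(n) pass (vs A's quadratic while/pop loop); equivalence is about the RETURN value only —
-- Python A mutates its argument list in place, B does not.

-- ===== PORT A =====
-- while i < len(x) - 1: pop x[i+1] when x[i]+x[i+1]==t else i += 1.
-- x.pop(i+1) is transcribed as take (i+1) ++ drop (i+2); indices are always in range under the loop guard.
-- fuel-based structural recursion: each iteration either pops one element or advances i,
-- so len(x) iterations always suffice (proved in troubleLoop_keep / trouble_spec)
def troubleLoop (fuel : Nat) (xs : List Int) (t : Int) (i : Nat) : List Int :=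
  match fuel with
  | 0 => xs
  | fuel + 1 =>
    if h : i + 1 < xs.length then
      if xs[i]'(by omega) + xs[i+1]'h = t then
        troubleLoop fuel (xs.take (i+1) ++ xs.drop (i+2)) t i
      else
        troubleLoop fuel xs t (i+1)
    else xs

def trouble (x : List Int) (t : Int) : List Int := troubleLoop x.length x t 0

-- ===== PORT B =====
-- single pass: append v unless the last kept element sums with it to t
def trouble_alt (x : List Int) (t : Int) : List Int :=
  x.foldl (fun out v =>
    match out.getLast? with
    | some l => if l + v = t then out else out ++ [v]
    | none => [v]) []

-- ===== PRECONDITION & SPEC =====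
def Spec_trouble (x : List Int) (t : Int) (out : List Int) : Prop := out = trouble_alt x t
instance (x : List Int) (t : Int) (out : List Int) : Decidable (Spec_trouble x t out) := by unfold Spec_trouble; infer_instance

-- ===== CLAIM (what is proved, stated in full; the proofs are below) =====
def Claim_equal_trouble : Prop := ∀ (x : List Int) (t : Int), Dom_trouble x t → Spec_trouble x t (trouble x t)

-- ===== LEMMAS AND PROOFS =====

-- common characterisation: elements kept after a last-kept value l
def pvKeep (t l : Int) : List Int → List Int
  | [] => []
  | v :: vs => if l + v = t then pvKeep t l vs else v :: pvKeep t v vs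

theorem trouble_alt_keep (t : Int) (vs : List Int) :
    ∀ (acc : List Int) (l : Int), acc.getLast? = some l →
      vs.foldl (fun out v =>
        match out.getLast? with
        | some l => if l + v = t then out else out ++ [v]
        | none => [v]) acc = acc ++ pvKeep t l vs := by
  induction vs with
  | nil => intro acc l _; simp [pvKeep]
  | cons v vs ih =>
    intro acc l hl
    simp only [List.foldl_cons, hl, pvKeep]
    by_cases h : l + v = t
    · simp only [h, if_pos]
      exact ih acc l hl
    · simp only [if_neg h]
      rw [ih (acc ++ [v]) v (by simp)]
      simp

theorem troubleLoop_keep (t : Int) (vs : List Int) :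
    ∀ (fuel : Nat) (pre : List Int) (l : Int), vs.length ≤ fuel → pre.getLast? = some l →
      troubleLoop fuel (pre ++ vs) t (pre.length - 1) = pre ++ pvKeep t l vs := by
  induction vs with
  | nil =>
    intro fuel pre l _ hl
    have hne : pre ≠ [] := by intro h; simp [h] at hl
    cases fuel with
    | zero => simp [troubleLoop, pvKeep]
    | succ fuel =>
      rw [troubleLoop]
      simp [pvKeep]
      omega
  | cons v vs ih =>
    intro fuel pre l hfuel hl
    obtain ⟨f, rfl⟩ : ∃ f, fuel = f + 1 := by
      cases fuel with
      | zero => simp at hfuel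
      | succ f => exact ⟨f, rfl⟩
    have hf : vs.length ≤ f := by simp at hfuel; omega
    have hne : pre ≠ [] := by intro h; simp [h] at hl
    have hlen : 0 < pre.length := List.length_pos_iff.mpr hne
    rw [troubleLoop]
    have hcond : pre.length - 1 + 1 < (pre ++ v :: vs).length := by
      simp [List.length_append]; omega
    rw [dif_pos hcond]
    have hidx1 : pre.length - 1 + 1 = pre.length := by omega
    have hget2 : (pre ++ v :: vs)[pre.length - 1 + 1]'hcond = v := by
      simp only [hidx1]
      rw [List.getElem_append_right (by omega)]
      simp
    have hget1 : (pre ++ v :: vs)[pre.length - 1]'(by omega) = l := by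
      rw [List.getElem_append_left (by omega)]
      have := List.getLast?_eq_getElem? (l := pre)
      rw [hl] at this
      have h2 : pre[pre.length - 1]? = some l := this.symm
      rw [List.getElem?_eq_getElem (by omega)] at h2
      exact Option.some.inj h2
    rw [hget1, hget2]
    by_cases h : l + v = t
    · rw [if_pos h]
      have htk : (pre ++ v :: vs).take (pre.length - 1 + 1) = pre := by
        rw [hidx1]; simp
      have hdr : (pre ++ v :: vs).drop (pre.length - 1 + 2) = vs := by
        have : pre ++ v :: vs = (pre ++ [v]) ++ vs := by simp
        rw [this]
        have h2 : pre.length - 1 + 2 = (pre ++ [v]).length := by simp; omega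
        rw [h2, List.drop_left]
      rw [htk, hdr, ih f pre l hf hl]
      simp [pvKeep, h]
    · rw [if_neg h]
      have hre : pre ++ v :: vs = (pre ++ [v]) ++ vs := by simp
      have hi : pre.length - 1 + 1 = (pre ++ [v]).length - 1 := by simp; omega
      rw [hre, hi, ih f (pre ++ [v]) v hf (by simp)]
      simp [pvKeep, h]

-- ===== VERDICT (by name: the statement is the Claim_ definition above) =====
theorem trouble_spec : Claim_equal_trouble := by
  intro x t _
  unfold Spec_trouble trouble trouble_alt
  cases x with
  | nil => simp [troubleLoop]
  | cons v vs =>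
    have hA : troubleLoop (v :: vs).length ([v] ++ vs) t (([v] : List Int).length - 1)
        = [v] ++ pvKeep t v vs :=
      troubleLoop_keep t vs (v :: vs).length [v] v (by simp) (by simp)
    simp only [List.length_cons, List.length_nil, Nat.add_sub_cancel,
      List.singleton_append] at hA
    simp only [List.length_cons]
    rw [hA]
    simp only [List.foldl_cons, List.getLast?_nil]
    rw [trouble_alt_keep t vs [v] v (by simp)]
    simp
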